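/- GENERATED by mk_final_copies.py from the proof of the farm's unit `start_decoder.C5b` (farm:start_decoder.C5b.1: Proof.lean) as the
   re-elaboration sweep compiled it — do not edit. -/
import Asan.CheckWalk
import Vorbis.Spec.Units.start_decoder_C5b
import Vorbis.Spec.StartDecoderCarry
import Vorbis.Spec.StartDecoderC7
import Vorbis.Spec.Worked.start_decoder_C5b_Lemmas

open X86 X86.User Asan Vorbis Vorbis.Spec Vorbis.Spec.StartDecoder

set_option maxRecDepth 100000
set_option maxHeartbeats 4000000

namespace Vorbis.Spec.start_decoder_C5b

/-- **Segment C5b of `start_decoder`** (`cut110` 0x1145e9, the return of `setup_malloc(f, c->entries)`, stb_vorbis_fixed.c:3804–3806):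
the checked store `c->codeword_lengths = p` (check 0x1145f0, `C7.cb_site`), the NULL test; NULL → the stub 0x114825 `error(f, 3)`,
`jmp 0x113b22` and `AtERR` (`c5b_carry` + `Cur.failed`); otherwise the checked load of `c->entries` (0x114609) and
`memcpy(p, lengths, E)` — both ranges inside one live arena block each, the setup block below the temp block — and `At5N` at its
return `cut111` (`c5b_carry` + `c5b_build`: the copied bytes are memcpy's post joined with the unchanged temp block). -/
theorem c5b_walk {Lay : Layout} (hLay : Lay.hi = 0x1000000) {μ : Microarch} (hμ : UserX.MicroOK μ) {u₀ : State}
    (hcode : HasCodeNat Lay u₀ Vorbis.L.start_decoder.entry Vorbis.Code.code_start_decoder.nat Vorbis.L.start_decoder.size)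
    (hld4 : Asan.SmallCheck Lay μ Vorbis.WayInv (Vorbis.CodeOK u₀) [.rax, .rcx, .rdx] 4 Vorbis.L.__asan_load4_noabort.entry)
    (hst8 : Asan.SmallCheck Lay μ Vorbis.WayInv (Vorbis.CodeOK u₀) [.rax, .rcx, .rdx] 8 Vorbis.L.__asan_store8_noabort.entry)
    (h_memcpy : ∀ (others : List Obj) (frames : List (Nat × FrameLayout)), Calls Lay μ Vorbis.WayInv (Vorbis.conv u₀) Vorbis.L.memcpy.entry (Vorbis.Spec.memcpy.spec others frames))
    (h_error : ∀ (others : List Obj) (frames : List (Nat × FrameLayout)), Calls Lay μ Vorbis.WayInv (Vorbis.conv u₀) Vorbis.L.error.entry (Vorbis.Spec.error.spec others frames))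
    {g : Ghost} {i : Nat} {v : State} {A : Arena × List Obj} {lengths : Nat} {A2 A3 Ai : Arena}
    (h : In5M u₀ g i A2 A3 Ai A lengths v) :
    ReachVia Lay μ WayInv v (fun w => At5N u₀ g i w ∨ AtERR u₀ g w) := by
  have hfr := h.frame
  have hhand := h.cur.hand
  have he := hfr.entry
  v_entry he
  simp only [depth] at he_room he_stack
  have w_rip := hfr.rip
  have w_eq : Mem.EqOn Vorbis.L.textLo Vorbis.L.textHi u₀.mem v.mem := hfr.code
  have hdf : v.flags .df = false := (show abiInv _ from hfr.inv).1
  have hmx : v.mxcsr &&& 0x1F80 = 0x1F80 := (show abiInv _ from hfr.inv).2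
  have hsse := Vorbis.sseOK_of_abiInv hfr.inv
  obtain ⟨hR1, hR2⟩ := hfr.r_eq
  have eR : g.R = (g.e.reg .rsp).toNat - 1480 := rfl
  have eRA : g.RA = (g.e.reg .rsp).toNat := rfl
  have c_rsp : v.reg .rsp = g.e.reg .rsp - 1480 := by
    rw [hfr.rsp, eR, ← Vorbis.addr_sub_lit _ 1480 (by show (1480 : Nat) ≤ _; omega), Vorbis.addr_toNat]
  have r_f : v.mem.readLE (g.e.reg .rsp - 1456) 8 = g.f := by
    have e : g.e.reg .rsp - 1456 = addr (g.R + 0x18) := by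
      have e1 : g.R + 0x18 = (g.e.reg .rsp).toNat - 1456 := by
        show (g.e.reg .rsp).toNat - 1480 + 0x18 = _
        omega
      rw [e1, ← Vorbis.addr_sub_lit _ 1456 (by show (1456 : Nat) ≤ _; omega), Vorbis.addr_toNat]
    rw [e]
    exact h.cur.slot_f
  have hpos : Pos g A := Pos.of hfr h.cur
  have hm0 : MInv g i A2 A3 Ai A v.mem := MInv.of hfr h.cur
  have hcw := hm0.c_where
  obtain ⟨c, hc⟩ : ∃ c, g.cb v.mem i = c := ⟨_, rfl⟩
  have c_r14 := h.cur.r14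
  have c_rbx := h.rbx
  rw [hc] at c_r14 hcw
  have hcT : (addr c).toNat = c := Vorbis.toNat_addr _ (by omega)
  have hText : 1154368 ≤ A.1.B := hhand.arenaText
  have hfT : (addr g.f).toNat = g.f := Vorbis.toNat_addr _ (by
    have := hpos.f_hi
    omega)
  have hk1 := h.k1
  rw [hc] at hk1
  have r4 : v.mem.readLE (addr c + 4) 4 = (Codebook.entries v.mem c).toNat := by
    have h0 := hk1.ent_nonneg
    simp only [vacc, voff] at h0 ⊢
    rw [Vorbis.addr_add_lit]
    exact v.mem.u32_of_i32_nonneg (c + 4) h0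
  have herr := h_error A.2 g.frames'
  have hmcp := h_memcpy A.2 g.frames'
  have p6 := hpos.f_stack
  obtain ⟨p, c_rax⟩ : ∃ p, v.reg .rax = p := ⟨_, rfl⟩
  have hsub : ∀ o, o ∈ stackObjs g.frames ++ A.2 → o ∈ stackObjs g.frames' ++ A.2 := by
    intro o ho
    unfold Ghost.frames'
    rw [stackObjs_cons]
    rcases List.mem_append.mp ho with hs | ho'
    · exact List.mem_append_left _ (List.mem_append_right _ hs)
    · exact List.mem_append_right _ ho'
  have t1 : (g.e.reg .rsp - 1488).toNat = (g.e.reg .rsp).toNat - 1488 := by u_omega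
  have ha := h.cur.sd.arena
  -- the temp block P1 = (lengths, E)
  have hE0 := hk1.ent_nonneg
  have hE1 := hk1.ent_lt
  have htb : A.1.TBlock lengths (Codebook.entries v.mem c).toNat := by
    have := h.temps.tblock (p := lengths) (n := (Codebook.entries v.mem (g.cb v.mem i)).toNat) (List.mem_singleton.mpr rfl)
    rw [hc] at this
    exact this
  have htoff := ha.tblock_off htb
  have htr := ha.tblock_range htb
  have hlT : (addr lengths).toNat = lengths := Vorbis.toNat_addr _ (by omega)
  have hab := ha.bounds
  have p1 := hpos.r_eq
  have p2 := hpos.ra_lo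
  have p3 := hpos.ra_hi
  have p10 := hpos.ar_hi
  have p11 := hpos.ar_stack
  have p7 := hpos.objOut
  have hEdx : (Word.ofBV (BitVec.signExtend 64 (BitVec.ofNat 32 (Codebook.entries v.mem c).toNat))).toNat =
      (Codebook.entries v.mem c).toNat := by
    have e1 : (BitVec.ofNat 32 (Codebook.entries v.mem c).toNat).toNat = (Codebook.entries v.mem c).toNat :=
      toNat_ofNat32 _ (by omega)
    rw [toNat_sext32 _ (by rw [e1]; omega), e1]
  -- the allocator's result: `rax = p`
  have halloc := h.alloc
  rw [c_rax, hc] at halloc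
  u_walk hcode [hμ.vendor] until [Vorbis.L.start_decoder.cut125, Vorbis.L.start_decoder.cut111] span [Vorbis.L.textLo, Vorbis.L.textHi] side (v_side)
  case check_1145f0 =>
    -- 0x1145f0, store8 check of `c->codeword_lengths` (line 3804): `[c + 8, c + 16)` inside the struct `cb(i)`
    have hun : ShadowUntouched v.mem s_1145f0.mem := by v_untouched
    have hsite := C7.cb_site h.cur 8 8 (by omega) (by omega)
    rw [hc] at hsite
    apply Vorbis.Spec.check_site hfr.shadow hun hsite
    u_omega
  case check_114609 =>
    -- 0x114609, load4 check of `c->entries` (line 3806): `[c + 4, c + 8)` inside the struct `cb(i)`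
    have hun : ShadowUntouched v.mem s_114609.mem := by v_untouched
    have hsite := C7.cb_site h.cur 4 4 (by omega) (by omega)
    rw [hc] at hsite
    apply Vorbis.Spec.check_site hfr.shadow hun hsite
    u_omega
  case call_inv => v_inv
  case call_inv => v_inv
  case pre_114832 =>
    -- 0x114832, `error(f, VORBIS_outofmem)` (line 3805): the shadow layer at the callee's entry, `*f` inside one live object
    have hun : ShadowUntouched v.mem s_114832.mem := by v_untouched
    have hf' : (s_114832.reg .rdi).toNat = g.f := by
      rw [w_rdi]
      exact hfT
    have hrs : (s_114832.reg .rsp).toNat + 8 = g.R := by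
      rw [w_rsp]
      u_omega
    refine ⟨⟨?_, hfr.offText⟩, ?_⟩
    · rw [hrs]
      exact hfr.shadow.untouched hun
    · rw [hf']
      exact hhand.obj.mono hsub
  case pre_114618 =>
    -- 0x114618, `memcpy(p, lengths, E)` (line 3806): the source is the temp block P1, the destination the new setup block
    have hun : ShadowUntouched v.mem s_114618.mem := by v_untouched
    have hS : Since Ai A.1 ⟨p.toNat, (Codebook.entries v.mem c).toNat⟩ :=
      halloc.resolve_left (fun h0 => hbr_1145fc (by rw [h0]; rfl))
    have hPB : A.1.Block p.toNat (Codebook.entries v.mem c).toNat := hS.1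
    have hrs : (s_114618.reg .rsp).toNat + 8 = g.R := by
      rw [w_rsp]
      u_omega
    have hdj := ha.block_tblock_disjoint hPB htb
    simp only [vblock] at hdj
    refine ⟨⟨?_, hfr.offText⟩, Or.inr ⟨?_, ?_, ?_⟩⟩
    · rw [hrs]
      exact hfr.shadow.untouched hun
    · rw [w_rsi, w_rdx, hlT, hEdx]
      exact ⟨⟨lengths, _, .temp⟩, List.mem_append_right _ (ha.AR6 _ htb.obj_mem), Nat.le_refl _, Nat.le_refl _⟩
    · rw [w_rdi, w_rdx, hEdx]
      exact ⟨⟨p.toNat, _, .setup⟩, List.mem_append_right _ (ha.AR6 _ hPB.obj_mem), Nat.le_refl _, Nat.le_refl _⟩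
    · rw [w_rdi, w_rsi, w_rdx, hlT, hEdx]
      have hr := ha.block_range hPB
      have := le_r8 (Codebook.entries v.mem c).toNat
      omega
  case cont =>
    -- 0x114837: `error(f, VORBIS_outofmem)` returned: the `jmp` to the epilogue
    have hsA : Mem.SameExcept [⟨g.R - 408, g.R⟩, ⟨c + 8, c + 16⟩] v.mem s_114832.mem := by u_same
    have hunA : ShadowUntouched v.mem s_114832.mem := by v_untouched
    rw [w_mem_114832] at hsA hunA
    v_after_call w_rsp_114832 w_mem_114832
    have hf : (s_114832.reg .rdi).toNat = g.f := by
      rw [w_rdi_114832]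
      exact hfT
    simp only [hf, t1] at w_same
    have hp : s_114832r.reg .rax = 0 ∧ ShadowUntouched s_114832.mem s_114832r.mem ∧
        s_114832r.mem.readLE (s_114832.reg .rdi + 140) 4 = (s_114832.reg .rsi).toNat % 2 ^ 32 := w_post
    have w_rax : s_114832r.reg .rax = 0 := hp.1
    have hun3 : ShadowUntouched s_114832.mem s_114832r.mem := hp.2.1
    rw [w_mem_114832] at hun3
    have hsB : Mem.SameExcept [⟨g.R - 408, g.R⟩, ⟨c + 8, c + 16⟩, ⟨g.f + 140, g.f + 144⟩] v.mem s_114832r.mem := by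
      refine (C7.sameExcept_weaken hsA ?_).trans (w_same.mono ?_)
      · intro w hw
        simp only [List.mem_cons, List.mem_nil_iff, or_false] at hw ⊢
        rcases hw with rfl | rfl
        · exact Or.inl rfl
        · exact Or.inr (Or.inl rfl)
      · intro w hw a h1 h2
        simp only [List.mem_cons, List.mem_nil_iff, or_false] at hw
        rcases hw with rfl | rfl
        · simp only [] at h1 h2
          exact ⟨_, List.mem_cons_self, by simp only []; omega, by simp only []; omega⟩
        · simp only [] at h1 h2
          exact ⟨_, List.mem_cons_of_mem _ (List.mem_cons_of_mem _ List.mem_cons_self), by simp only []; omega,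
            by simp only []; omega⟩
    have hunB : ShadowUntouched v.mem s_114832r.mem := Mem.EqOn.trans hunA hun3
    have hokB : ∀ w, w ∈ [(⟨g.R - 408, g.R⟩ : Span), ⟨c + 8, c + 16⟩, ⟨g.f + 140, g.f + 144⟩] →
        C5bWin g Ai A (g.cb v.mem i) w := by
      intro w hw
      rw [hc]
      simp only [List.mem_cons, List.mem_nil_iff, or_false] at hw
      unfold C5bWin
      rcases hw with rfl | rfl | rfl <;> simp only [] <;> omega
    u_walk hcode [hμ.vendor] until [Vorbis.L.start_decoder.cut4] span [Vorbis.L.textLo, Vorbis.L.textHi] side (v_side)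
    have hsC : Mem.SameExcept [⟨g.R - 408, g.R⟩, ⟨c + 8, c + 16⟩, ⟨g.f + 140, g.f + 144⟩] v.mem s_114837.mem := by
      rw [w_mem]
      exact hsB
    have hunC : ShadowUntouched v.mem s_114837.mem := by
      rw [w_mem]
      exact hunB
    have hinv' : abiInv s_114837 := by
      refine Vorbis.abiInv_of ?_ ?_
      · rw [w_flags]
        exact w_df
      · rw [w_mxcsr]
        exact w_mx
    have hrsp' : s_114837.reg .rsp = v.reg .rsp := by
      rw [w_rsp, c_rsp]
    obtain ⟨hfr', hcur', _, _, _⟩ := c5b_carry hfr h.cur hsC hunC hokB w_rip hrsp' w_eq hinv' (w_kept.get .r14 rfl)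
    apply ReachVia.done
    refine Or.inr ⟨A, hfr', hhand, Or.inl ⟨?_, hcur'.failed⟩⟩
    rw [w_rax]
    rfl
  case cont =>
    -- 0x11461d: `memcpy(p, lengths, E)` returned
    have hS : Since Ai A.1 ⟨p.toNat, (Codebook.entries v.mem c).toNat⟩ :=
      halloc.resolve_left (fun h0 => hbr_1145fc (by rw [h0]; rfl))
    have hPB : A.1.Block p.toNat (Codebook.entries v.mem c).toNat := hS.1
    have hsA : Mem.SameExcept [⟨g.R - 408, g.R⟩, ⟨c + 8, c + 16⟩] v.mem s_114618.mem := by u_same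
    have hunA : ShadowUntouched v.mem s_114618.mem := by v_untouched
    have hcl0 : s_114618.mem.readLE (addr c + 8) 8 = p.toNat := by
      rw [w_mem_114618]
      u_read
    rw [w_mem_114618] at hsA hunA hcl0
    v_after_call w_rsp_114618 w_mem_114618
    simp only [w_rdi_114618, w_rdx_114618, hEdx, t1] at w_same
    have hpost : s_114618r.reg .rax = s_114618.reg .rdi ∧ ShadowUntouched s_114618.mem s_114618r.mem ∧
        ∀ j, j < (s_114618.reg .rdx).toNat →
          s_114618r.mem.readLE (s_114618.reg .rdi + UInt64.ofNat j) 1 =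
            s_114618.mem.readLE (s_114618.reg .rsi + UInt64.ofNat j) 1 := w_post
    obtain ⟨_, hun3, hbytes⟩ := hpost
    rw [w_rdx_114618, hEdx] at hbytes
    rw [w_mem_114618] at hun3 hbytes
    -- where the new block is: inside the arena, off the struct, off the stack
    have hpin := arena_inside ha hS.1
    have hpoff := ha.block_off hPB
    obtain ⟨_, hpbook⟩ := young_off_book hm0 hS
    rw [hc] at hpbook
    simp only [] at hpin hpbook
    have hdj := ha.block_tblock_disjoint hPB htb
    simp only [vblock] at hdj
    have hsB : Mem.SameExcept [⟨g.R - 408, g.R⟩, ⟨c + 8, c + 16⟩,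
        ⟨p.toNat, p.toNat + (Codebook.entries v.mem c).toNat⟩] v.mem s_114618r.mem := by
      refine (C7.sameExcept_weaken hsA ?_).trans (w_same.mono ?_)
      · intro w hw
        simp only [List.mem_cons, List.mem_nil_iff, or_false] at hw ⊢
        rcases hw with rfl | rfl
        · exact Or.inl rfl
        · exact Or.inr (Or.inl rfl)
      · intro w hw a h1 h2
        simp only [List.mem_cons, List.mem_nil_iff, or_false] at hw
        rcases hw with rfl | rfl
        · simp only [] at h1 h2
          exact ⟨_, List.mem_cons_self, by simp only []; omega, by simp only []; omega⟩
        · simp only [] at h1 h2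
          exact ⟨_, List.mem_cons_of_mem _ (List.mem_cons_of_mem _ List.mem_cons_self), by simp only []; omega,
            by simp only []; omega⟩
    have hunB : ShadowUntouched v.mem s_114618r.mem := Mem.EqOn.trans hunA hun3
    have hokB : ∀ w, w ∈ [(⟨g.R - 408, g.R⟩ : Span), ⟨c + 8, c + 16⟩,
        ⟨p.toNat, p.toNat + (Codebook.entries v.mem c).toNat⟩] → C5bWin g Ai A (g.cb v.mem i) w := by
      intro w hw
      rw [hc]
      simp only [List.mem_cons, List.mem_nil_iff, or_false] at hw
      unfold C5bWin
      rcases hw with rfl | rfl | rfl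
      · left
        simp only []
        omega
      · right
        left
        simp only []
        omega
      · right
        right
        right
        refine ⟨hpin.1, hpin.2, ?_⟩
        intro B hB
        have hd := ha.old_disjoint_since h.cur.ages.exti hB hS
        simp only [vblock] at hd
        simp only []
        omega
    have hinv' : abiInv s_114618r := Vorbis.abiInv_of w_df w_mx
    have hrsp' : s_114618r.reg .rsp = v.reg .rsp := by
      rw [w_rsp, c_rsp]
    obtain ⟨hfr', hcur', hcb, hlo, hhi⟩ := c5b_carry hfr h.cur hsB hunB hokB w_rip hrsp' w_eq hinv' (w_kept.get .r14 rfl)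
    -- the stored pointer, read through memcpy's footprint
    have hcl : Codebook.codeword_lengths s_114618r.mem c = p.toNat := by
      simp only [vacc, voff]
      unfold Mem.u64
      rw [← Vorbis.addr_add_lit, w_same.readLE (addr c + 8) 8 ?_ ?_]
      · exact hcl0
      · u_omega
      · intro w hw
        simp only [List.mem_cons, List.mem_nil_iff, or_false] at hw
        have e8 : (addr c + 8).toNat = c + 8 := by u_omega
        rcases hw with rfl | rfl
        · simp only []
          omega
        · simp only []
          omega
    -- the copied bytes
    have hcopy : ∀ j, j < (Codebook.entries v.mem c).toNat → s_114618r.mem.u8 (p.toNat + j) = v.mem.u8 (lengths + j) := by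
      intro j hj
      have e1 : s_114618.reg .rdi + UInt64.ofNat j = addr (p.toNat + j) := by
        rw [w_rdi_114618, ← Vorbis.addr_add, Vorbis.addr_toNat]
      have e2 : s_114618.reg .rsi + UInt64.ofNat j = addr (lengths + j) := by
        rw [w_rsi_114618, Vorbis.addr_add]
      have e3 : (addr (lengths + j)).toNat = lengths + j := Vorbis.toNat_addr _ (by omega)
      unfold Mem.u8
      rw [← e1, hbytes j hj, e2]
      apply hsA.readLE _ 1 (by omega)
      intro w hw
      simp only [List.mem_cons, List.mem_nil_iff, or_false] at hw
      rcases hw with rfl | rfl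
      · simp only []
        omega
      · simp only []
        have hdc := ha.blk_tblock_disjoint (h.cur.ages.cbOK.F2.mono h.cur.ages.exti) htb
        have hci := h.cur.ages.cbOK.cb_in i h.cur.lt
        have hcdef : stb_vorbis.codebooks_at v.mem g.f i = g.cb v.mem i := rfl
        simp only [vblock, voff] at hdc hci
        rw [hcdef, hc] at hci
        omega
    have hr13 : s_114618r.reg .r13 = addr (c + 4) := by
      rw [w_r13, Vorbis.addr_add_lit]
    have hrbx : s_114618r.reg .rbx = v.reg .rbx := w_kept.get .rbx rfl
    subst hc
    apply ReachVia.done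
    exact Or.inl ⟨A, lengths, A2, A3, Ai, c5b_build h hfr' hcur' hcb hlo hhi hcl hS hcopy hrbx hr13⟩

end Vorbis.Spec.start_decoder_C5b

/-- The unit `start_decoder.C5b`: `c5b_walk` at every entry state. -/
theorem Vorbis.Spec.Worked.start_decoder_C5b_ok : Vorbis.Spec.start_decoder_C5b.Statement := by
  intro Lay hLay μ hμ u₀ hcode hld4 hst8 h_memcpy h_error g i v hat
  obtain ⟨A, lengths, A2, A3, Ai, h⟩ := hat
  exact Vorbis.Spec.start_decoder_C5b.c5b_walk hLay hμ hcode hld4 hst8 h_memcpy h_error h
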